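-- pv_equiv track=rewrite | github.com/knp069/projectEuler | projectEuler17.py | stringsplitwrapper
-- ===== SOURCE A (Python) =====
-- def stringSplit(s,l):
--     return [s[::-1][i:i+l][::-1] for i in range(0,len(s),l)]
--
-- def stringsplitwrapper(s,l):
--     strs = stringSplit(s,l)
--     strs.reverse()
--     rets = []
--     for s in strs:
--         k = [s[::-1][i:i+2][::-1] for i in range(0,len(s),2)]
--         k.reverse()
--         for i in k:
--             rets.append(i)
--     return rets
-- ===== SOURCE B (Python) =====
-- # Single pass: peel pieces from the left, computing each right-aligned boundary arithmetically.
-- def stringsplitwrapper(s, l):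
--     if l <= 0:
--         return []
--     rets = []
--     i, n = 0, len(s)
--     while i < n:
--         f = (n - i) % l or l      # length of the current right-aligned chunk's head
--         g = f % 2 or 2            # length of that chunk's first right-aligned pair
--         rets.append(s[i:i + g])
--         i += g
--     return rets
-- ===== Notes on version B (the rewrite author's own statement) =====
-- stated objective: faster
-- what changed: B replaces A's double right-aligned chunking via repeated string reversals and nested intermediate lists by a single left-to-right pass that computes each piece boundary arithmetically ((n-i) % l or l, then % 2 or 2) and slices each piece out directly.
import Mathlib
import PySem

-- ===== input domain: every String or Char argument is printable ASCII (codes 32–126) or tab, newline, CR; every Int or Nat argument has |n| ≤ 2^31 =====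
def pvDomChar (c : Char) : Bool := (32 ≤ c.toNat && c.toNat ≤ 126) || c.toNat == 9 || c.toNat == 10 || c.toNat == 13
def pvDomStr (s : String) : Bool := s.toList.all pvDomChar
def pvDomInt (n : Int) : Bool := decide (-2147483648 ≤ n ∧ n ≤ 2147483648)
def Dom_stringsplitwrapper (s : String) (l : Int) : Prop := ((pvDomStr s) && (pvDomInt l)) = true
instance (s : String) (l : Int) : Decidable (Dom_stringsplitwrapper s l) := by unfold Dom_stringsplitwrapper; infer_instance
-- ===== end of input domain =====

-- B replaces A's repeated string reversals and nested chunk lists by one left-to-right pass whose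
-- right-aligned piece boundaries are computed arithmetically (objective: faster, single pass).

-- ===== PORT A =====
-- stringSplit(s,l) = [s[::-1][i:i+l][::-1] for i in range(0,len(s),l)]
-- (s[::-1] is reverse — PySem.List.slice?_none_none_neg_one; slices stay PySem.List.slice)
def pvChunksRev (cs : List Char) (m : Int) : List (List Char) :=
  (PySem.List.pyRange 0 (cs.length : Int) m).map
    (fun i => (PySem.List.slice cs.reverse (some i) (some (i + m))).reverse)

-- wrapper: strs = stringSplit(s,l); strs.reverse(); for s in strs: k = pairs; k.reverse(); append each
def stringsplitwrapper (s : String) (l : Int) : List String :=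
  ((pvChunksRev s.toList l).reverse).foldl
    (fun rets c =>
      ((pvChunksRev c 2).reverse).foldl (fun r p => r ++ [String.ofList p]) rets) []

-- ===== PORT B =====
-- the while loop of Source B, state = the remaining suffix of s (s[i:]); s[i:i+g] is take g of it
def pvAltGo : Nat → List Char → Int → List String
  | 0, _, _ => []
  | fuel+1, cs, l =>
    if cs.isEmpty then []
    else
      let f : Int := if PySem.Int.mod (cs.length : Int) l = 0 then l
                     else PySem.Int.mod (cs.length : Int) l     -- (n-i) % l or l
      let g : Int := if PySem.Int.mod f 2 = 0 then 2 else PySem.Int.mod f 2  -- f % 2 or 2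
      String.ofList (cs.take g.toNat) :: pvAltGo fuel (cs.drop g.toNat) l

def stringsplitwrapper_alt (s : String) (l : Int) : List String :=
  if l ≤ 0 then [] else pvAltGo s.toList.length s.toList l

-- ===== PRECONDITION & SPEC =====
-- Pre_ excludes exactly l = 0, on which A raises ValueError (range() with step 0).
def Pre_stringsplitwrapper (s : String) (l : Int) : Prop := l ≠ 0
instance (s : String) (l : Int) : Decidable (Pre_stringsplitwrapper s l) := by
  unfold Pre_stringsplitwrapper; infer_instance
def pvWitness_stringsplitwrapper : String × Int := ("abcdefg", 3)

def Spec_stringsplitwrapper (s : String) (l : Int) (out : List String) : Prop :=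
  out = stringsplitwrapper_alt s l
instance (s : String) (l : Int) (out : List String) : Decidable (Spec_stringsplitwrapper s l out) := by
  unfold Spec_stringsplitwrapper; infer_instance

-- ===== CLAIM (what is proved, stated in full; the proofs are below) =====
def Claim_equal_stringsplitwrapper : Prop := ∀ (s : String) (l : Int),
  Dom_stringsplitwrapper s l → Pre_stringsplitwrapper s l →
  Spec_stringsplitwrapper s l (stringsplitwrapper s l)

-- ===== LEMMAS AND PROOFS =====

-- length (in Nat) of the first right-aligned chunk of a block of length n cut every m
def pvF (n m : Nat) : Nat := if n % m = 0 then m else n % m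

lemma pvF_pos {n m : Nat} (hm : 0 < m) : 0 < pvF n m := by
  unfold pvF; split_ifs with h
  · exact hm
  · omega

lemma pvF_le {n m : Nat} (hm : 0 < m) (hn : 0 < n) : pvF n m ≤ n := by
  unfold pvF; split_ifs with h
  · exact Nat.le_of_dvd hn (Nat.dvd_of_mod_eq_zero h)
  · exact Nat.mod_le n m

lemma pvF_le_left {n m : Nat} (hm : 0 < m) : pvF n m ≤ m := by
  have := Nat.mod_lt n hm
  unfold pvF; split_ifs <;> omega

lemma pvF_eq (n m k r : Nat) (hr0 : 0 < r) (hrm : r ≤ m) (hn : n = m * k + r) :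
    pvF n m = r := by
  have hmod : n % m = r % m := by rw [hn, Nat.mul_add_mod]
  unfold pvF
  rcases Nat.lt_or_ge r m with hlt | hge
  · rw [hmod, Nat.mod_eq_of_lt hlt]
    rw [if_neg (by omega)]
  · have hrm' : r = m := by omega
    rw [if_pos (by rw [hmod, hrm']; exact Nat.mod_self m)]
    omega

lemma pvF_decompose (n m : Nat) (hm : 0 < m) (hn : 0 < n) :
    ∃ k, n = m * k + pvF n m := by
  rcases Nat.eq_zero_or_pos (n % m) with h0 | hpos
  · have hFe : pvF n m = m := by unfold pvF; rw [if_pos h0]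
    have hdm := Nat.div_add_mod n m
    have hnm : m ≤ n := Nat.le_of_dvd hn (Nat.dvd_of_mod_eq_zero h0)
    have hq1 : 1 ≤ n / m := (Nat.one_le_div_iff hm).mpr hnm
    refine ⟨n / m - 1, ?_⟩
    have hmul : m * (n / m - 1) = m * (n / m) - m := by rw [Nat.mul_sub, Nat.mul_one]
    omega
  · have hFe : pvF n m = n % m := by unfold pvF; rw [if_neg (by omega)]
    have hdm := Nat.div_add_mod n m
    exact ⟨n / m, by omega⟩

lemma pvChunksRev_nil (m : Int) : pvChunksRev [] m = [] := by
  unfold pvChunksRev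
  simp [PySem.List.pyRange]

-- pvChunksRev for a negative step is empty (range(0, n, l) is empty for l < 0, n ≥ 0)
lemma pvChunksRev_neg (cs : List Char) (l : Int) (hl : l < 0) : pvChunksRev cs l = [] := by
  unfold pvChunksRev
  have h1 : ¬ (l = 0) := by omega
  have h2 : ¬ (0 < l) := by omega
  have h3 : ¬ ((cs.length : Int) < 0) := by omega
  simp [PySem.List.pyRange, h1, h2, h3]

-- core of the peel lemma, with the block structure made explicit: |cs| = m*k + F, 1 ≤ F ≤ m
lemma pvChunksRev_peel_core (cs : List Char) (m F k : Nat) (hm : 0 < m) (hF1 : 1 ≤ F)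
    (hFm : F ≤ m) (hlen : cs.length = m * k + F) :
    (pvChunksRev cs (m : Int)).reverse
      = cs.take F :: (pvChunksRev (cs.drop F) (m : Int)).reverse := by
  have hmk1 : m * (k + 1) = m * k + m := by ring
  have hml : (0 : Int) < (m : Int) := by exact_mod_cast hm
  -- count of the outer range is k + 1
  have hcount : (((cs.length : Int)) - 0 + (m : Int) - 1) / (m : Int) = ((k + 1 : Nat) : Int) := by
    have h1 : ((cs.length : Int)) - 0 + (m : Int) - 1 = ((m * k + F + m - 1 : Nat) : Int) := by
      rw [hlen]; generalize m * k = a; omega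
    rw [h1, ← Int.natCast_div]
    congr 1
    have h2 : m * k + F + m - 1 = (F - 1) + m * (k + 1) := by omega
    rw [h2, Nat.add_mul_div_left _ _ hm, Nat.div_eq_of_lt (by omega)]
    omega
  have hrange : PySem.List.pyRange 0 (cs.length : Int) (m : Int)
      = (List.range (k + 1)).map (fun j : Nat => (m : Int) * (j : Int)) := by
    rw [PySem.List.pyRange_of_pos _ _ hml, if_pos (by exact_mod_cast (by omega : (0:Int) < cs.length))]
    rw [hcount, Int.toNat_natCast]
    apply List.map_congr_left
    intro a _
    ring
  have hlen_drop : (cs.drop F).length = m * k := by simp [hlen]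
  have hrange' : PySem.List.pyRange 0 ((cs.drop F).length : Int) (m : Int)
      = (List.range k).map (fun j : Nat => (m : Int) * (j : Int)) := by
    rw [hlen_drop, PySem.List.pyRange_of_pos _ _ hml]
    rcases Nat.eq_zero_or_pos k with hk0 | hkpos
    · rw [if_neg (by simp [hk0])]
      simp [hk0]
    · rw [if_pos (by exact_mod_cast (by positivity : 0 < m * k))]
      have hc : (((m * k : Nat) : Int) - 0 + (m : Int) - 1) / (m : Int) = ((k : Nat) : Int) := by
        have h1 : ((m * k : Nat) : Int) - 0 + (m : Int) - 1 = ((m * k + m - 1 : Nat) : Int) := by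
          generalize m * k = a; omega
        rw [h1, ← Int.natCast_div]
        congr 1
        have h2 : m * k + m - 1 = (m - 1) + m * k := by omega
        rw [h2, Nat.add_mul_div_left _ _ hm, Nat.div_eq_of_lt (by omega)]
        omega
      rw [hc, Int.toNat_natCast]
      apply List.map_congr_left
      intro a _
      omega
  unfold pvChunksRev
  rw [hrange, hrange', List.range_succ, List.map_append, List.map_append, List.reverse_append]
  simp only [List.map_cons, List.map_nil, List.reverse_cons, List.reverse_nil, List.nil_append,
    List.singleton_append]
  -- the last chunk of the range is the first (short) chunk of cs
  have hlast : (PySem.List.slice cs.reverse (some ((m : Int) * (k : Int)))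
      (some ((m : Int) * (k : Int) + (m : Int)))).reverse = cs.take F := by
    have h1 : (m : Int) * (k : Int) = ((m * k : Nat) : Int) := by push_cast; ring
    rw [h1, PySem.List.slice_natCast_add]
    have h4 : cs.reverse.drop (m * k) = (cs.take F).reverse := by
      rw [List.reverse_take]
      congr 1
      omega
    rw [h4, List.take_of_length_le (by simp [hlen]; omega), List.reverse_reverse]
  -- the earlier chunks of the range read cs.drop F through its reverse, a prefix of cs.reverse
  have hrest : ∀ j ∈ List.range k,
      (PySem.List.slice cs.reverse (some ((m : Int) * (j : Int)))
        (some ((m : Int) * (j : Int) + (m : Int)))).reverse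
      = (PySem.List.slice (cs.drop F).reverse (some ((m : Int) * (j : Int)))
        (some ((m : Int) * (j : Int) + (m : Int)))).reverse := by
    intro j hj
    have hjk : j < k := List.mem_range.mp hj
    congr 1
    have h1 : (m : Int) * (j : Int) = ((m * j : Nat) : Int) := by push_cast; ring
    rw [h1, PySem.List.slice_natCast_add, PySem.List.slice_natCast_add]
    have h4 : (cs.drop F).reverse = cs.reverse.take (m * k) := by
      rw [List.reverse_drop]
      congr 1
      omega
    rw [h4, List.drop_take, List.take_take]
    congr 1
    have hjm : m * j + m ≤ m * k := by
      have := Nat.mul_le_mul_left m (by omega : j + 1 ≤ k)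
      omega
    omega
  rw [hlast]
  congr 1
  congr 1
  rw [List.map_map, List.map_map]
  apply List.map_congr_left
  intro j hj
  simp only [Function.comp_apply]
  exact hrest j hj

lemma pvChunksRev_peel (cs : List Char) (l : Int) (hl : 0 < l) (hne : cs ≠ []) :
    (pvChunksRev cs l).reverse
      = cs.take (pvF cs.length l.toNat)
        :: (pvChunksRev (cs.drop (pvF cs.length l.toNat)) l).reverse := by
  have hm : 0 < l.toNat := by omega
  have hlm : l = ((l.toNat : Nat) : Int) := by omega
  have hn : 0 < cs.length := List.length_pos_iff.mpr hne
  have hF1 : 1 ≤ pvF cs.length l.toNat := pvF_pos hm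
  have hFm : pvF cs.length l.toNat ≤ l.toNat := by
    have := Nat.mod_lt cs.length hm
    unfold pvF; split_ifs <;> omega
  obtain ⟨k, hk⟩ := pvF_decompose cs.length l.toNat hm hn
  have hFn : pvF cs.length l.toNat ≤ cs.length := pvF_le hm hn
  rw [hlm]
  exact pvChunksRev_peel_core cs l.toNat (pvF cs.length l.toNat) k hm hF1 hFm (by omega)

-- A's wrapper as a flatMap
def pvFlat (cs : List Char) (l : Int) : List String :=
  ((pvChunksRev cs l).reverse).flatMap (fun c => ((pvChunksRev c 2).reverse).map String.ofList)

lemma pvA_eq_flat (s : String) (l : Int) : stringsplitwrapper s l = pvFlat s.toList l := by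
  unfold stringsplitwrapper pvFlat
  simp only [PySem.List.foldl_append_singleton_eq_map]
  exact (PySem.List.foldl_append_eq_flatMap _ _ []).trans (by simp)

lemma pvF_int_of_pos (n : Nat) (l : Int) (hl : 0 < l) :
    (if PySem.Int.mod (n : Int) l = 0 then l else PySem.Int.mod (n : Int) l)
      = ((pvF n l.toNat : Nat) : Int) := by
  have hmodl : PySem.Int.mod (n : Int) l = ((n % l.toNat : Nat) : Int) := by
    rw [PySem.Int.mod_eq_emod_of_pos hl]
    rw [show l = ((l.toNat : Nat) : Int) by omega]
    exact_mod_cast (Int.natCast_mod n l.toNat).symm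
  rw [hmodl]
  unfold pvF
  by_cases h0 : n % l.toNat = 0
  · rw [if_pos (by exact_mod_cast h0), if_pos h0]
    omega
  · rw [if_neg (by exact_mod_cast h0), if_neg h0]

lemma pvF_int_two (F : Nat) :
    (if PySem.Int.mod ((F : Nat) : Int) 2 = 0 then (2 : Int) else PySem.Int.mod ((F : Nat) : Int) 2)
      = ((pvF F 2 : Nat) : Int) := by
  have hmod2 : PySem.Int.mod ((F : Nat) : Int) 2 = ((F % 2 : Nat) : Int) := by
    rw [PySem.Int.mod_eq_emod_of_pos (by norm_num)]
    exact_mod_cast (Int.natCast_mod F 2).symm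
  rw [hmod2]
  unfold pvF
  by_cases h0 : F % 2 = 0
  · rw [if_pos (by exact_mod_cast h0), if_pos h0]
    norm_num
  · rw [if_neg (by exact_mod_cast h0), if_neg h0]

lemma pvFlat_peel (cs : List Char) (l : Int) (hl : 0 < l) (hne : cs ≠ []) :
    pvFlat cs l
      = String.ofList (cs.take (pvF (pvF cs.length l.toNat) 2))
        :: pvFlat (cs.drop (pvF (pvF cs.length l.toNat) 2)) l := by
  have hm : 0 < l.toNat := by omega
  have hn : 0 < cs.length := List.length_pos_iff.mpr hne
  have hF1 : 1 ≤ pvF cs.length l.toNat := pvF_pos hm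
  have hFm : pvF cs.length l.toNat ≤ l.toNat := pvF_le_left hm
  have hFn : pvF cs.length l.toNat ≤ cs.length := pvF_le hm hn
  have hG1 : 1 ≤ pvF (pvF cs.length l.toNat) 2 := pvF_pos (by norm_num)
  have hG2 : pvF (pvF cs.length l.toNat) 2 ≤ 2 := pvF_le_left (by norm_num)
  have hGF : pvF (pvF cs.length l.toNat) 2 ≤ pvF cs.length l.toNat := pvF_le (by norm_num) hF1
  have htakelen : (cs.take (pvF cs.length l.toNat)).length = pvF cs.length l.toNat := by
    rw [List.length_take]; omega
  have htne : cs.take (pvF cs.length l.toNat) ≠ [] := by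
    intro h
    rw [h] at htakelen
    simp at htakelen
    omega
  unfold pvFlat
  rw [pvChunksRev_peel cs l hl hne, List.flatMap_cons,
      pvChunksRev_peel (cs.take (pvF cs.length l.toNat)) 2 (by norm_num) htne]
  rw [show ((2 : Int)).toNat = 2 from rfl, htakelen]
  rw [List.map_cons, List.cons_append, List.take_take, min_eq_left hGF]
  congr 1
  rcases Nat.lt_or_ge (pvF (pvF cs.length l.toNat) 2) (pvF cs.length l.toNat) with hlt | hge
  · -- G < F: the leftover pairs of the first chunk head the peel of cs.drop G
    have hdne : cs.drop (pvF (pvF cs.length l.toNat) 2) ≠ [] := by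
      intro h
      have := congrArg List.length h
      simp at this
      omega
    rw [pvChunksRev_peel _ l hl hdne, List.flatMap_cons]
    obtain ⟨k, hk⟩ := pvF_decompose cs.length l.toNat hm hn
    have hFG : pvF (cs.drop (pvF (pvF cs.length l.toNat) 2)).length l.toNat
        = pvF cs.length l.toNat - pvF (pvF cs.length l.toNat) 2 := by
      rw [List.length_drop]
      exact pvF_eq _ _ k _ (by omega) (by omega) (by omega)
    rw [hFG]
    have h1 : (cs.drop (pvF (pvF cs.length l.toNat) 2)).take
          (pvF cs.length l.toNat - pvF (pvF cs.length l.toNat) 2)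
        = (cs.take (pvF cs.length l.toNat)).drop (pvF (pvF cs.length l.toNat) 2) :=
      (List.drop_take).symm
    have h2 : (cs.drop (pvF (pvF cs.length l.toNat) 2)).drop
          (pvF cs.length l.toNat - pvF (pvF cs.length l.toNat) 2)
        = cs.drop (pvF cs.length l.toNat) := by
      rw [List.drop_drop]
      congr 1
      omega
    rw [h1, h2]
  · -- G = F: the first chunk is a single pair; the tail is the peel of cs.drop F
    have hGFe : pvF (pvF cs.length l.toNat) 2 = pvF cs.length l.toNat := le_antisymm hGF hge
    have hdnil : (cs.take (pvF cs.length l.toNat)).drop (pvF (pvF cs.length l.toNat) 2) = [] :=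
      List.drop_of_length_le (by rw [htakelen]; omega)
    rw [hdnil, pvChunksRev_nil, hGFe]
    simp

lemma pvFlat_eq_go (fuel : Nat) (cs : List Char) (l : Int) (hl : 0 < l)
    (hfuel : cs.length ≤ fuel) : pvFlat cs l = pvAltGo fuel cs l := by
  induction fuel generalizing cs with
  | zero =>
    have hnil : cs = [] := List.eq_nil_of_length_eq_zero (by omega)
    rw [hnil]
    unfold pvFlat
    rw [pvChunksRev_nil]
    rfl
  | succ fuel ih =>
    by_cases hne : cs = []
    · rw [hne]
      unfold pvFlat
      rw [pvChunksRev_nil]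
      simp [pvAltGo]
    · rw [pvFlat_peel cs l hl hne]
      have hn : 0 < cs.length := List.length_pos_iff.mpr hne
      have hm : 0 < l.toNat := by omega
      have hG1 : 1 ≤ pvF (pvF cs.length l.toNat) 2 := pvF_pos (by norm_num)
      simp only [pvAltGo, List.isEmpty_iff, hne, if_false,
        pvF_int_of_pos cs.length l hl, pvF_int_two, Int.toNat_natCast]
      congr 1
      apply ih
      have := List.length_drop (l := cs) (i := pvF (pvF cs.length l.toNat) 2)
      omega

-- ===== VERDICT (by name: the statement is the Claim_ definition above) =====
theorem stringsplitwrapper_spec : Claim_equal_stringsplitwrapper := by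
  intro s l _ hpre
  unfold Spec_stringsplitwrapper stringsplitwrapper_alt
  rw [pvA_eq_flat]
  by_cases hl : 0 < l
  · rw [if_neg (by omega)]
    exact pvFlat_eq_go _ _ _ hl le_rfl
  · rw [if_pos (by omega)]
    unfold Pre_stringsplitwrapper at hpre
    unfold pvFlat
    rw [pvChunksRev_neg _ _ (by omega)]
    rfl
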